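-- pv_equiv track=rewrite | github.com/caer200/ocelot_api | task/nics.py | add_bqlines
-- ===== SOURCE A (Python) =====
-- def add_bqlines(stringinput, pts):
--     i_lastnonempty_line = 0
--     ls = stringinput.split('\n')
--     for i in range(len(ls)):
--         line = ls[i]
--         if len(line.strip()) != 0:
--             i_lastnonempty_line = i
--     ls = ls[:i_lastnonempty_line + 1]
--     for pt in pts:
--         bqline = '{}\t{}\t{}\t{}'.format('bq', *pt)
--         ls.append(bqline)
--     return '\n'.join(ls) + '\n \n '
-- ===== SOURCE B (Python) =====
-- def add_bqlines(stringinput, pts):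
--     ls = stringinput.split('\n')
--     while len(ls) > 1 and ls[-1].strip() == '':
--         ls.pop()
--     ls += ['bq\t%s\t%s\t%s' % pt for pt in pts]
--     return '\n'.join(ls) + '\n \n '
-- ===== Notes on version B (the rewrite author's own statement) =====
-- stated objective: idiomatic
-- what changed: Replaces the forward full scan that records the last non-empty line index plus a slice with an early-exit reverse trim (pop trailing blank lines while more than one remains), and replaces the explicit append loop with a list-comprehension extend.
import Mathlib
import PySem

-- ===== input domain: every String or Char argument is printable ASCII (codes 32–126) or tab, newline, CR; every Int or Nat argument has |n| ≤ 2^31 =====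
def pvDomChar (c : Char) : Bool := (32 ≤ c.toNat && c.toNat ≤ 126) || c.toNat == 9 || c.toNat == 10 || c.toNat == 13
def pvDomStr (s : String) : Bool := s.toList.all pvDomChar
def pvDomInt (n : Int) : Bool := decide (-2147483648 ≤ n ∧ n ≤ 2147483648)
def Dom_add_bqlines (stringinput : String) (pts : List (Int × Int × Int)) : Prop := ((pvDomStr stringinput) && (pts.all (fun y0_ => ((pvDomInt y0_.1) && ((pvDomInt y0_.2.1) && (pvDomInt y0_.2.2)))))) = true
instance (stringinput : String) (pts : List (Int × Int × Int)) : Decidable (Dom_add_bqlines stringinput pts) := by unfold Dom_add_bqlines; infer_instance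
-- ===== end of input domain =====

-- B keeps A's exact output but trims trailing blank lines from the end with an early-exit loop
-- instead of scanning the whole list for the last non-empty index, and extends with a mapped list.

-- ===== PORT A =====
-- 'bq\t{}\t{}\t{}'.format('bq', *pt) line (str() of each int)
def pvBqA (pt : Int × Int × Int) : String :=
  "bq" ++ "\t" ++ PySem.Int.toStr pt.1 ++ "\t" ++ PySem.Int.toStr pt.2.1 ++ "\t" ++ PySem.Int.toStr pt.2.2

def add_bqlines (stringinput : String) (pts : List (Int × Int × Int)) : String :=
  -- stringinput.split('\n'): sep "\n" ≠ "", so split? is always some and .getD [] is exact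
  let ls := (PySem.Str.split? stringinput "\n").getD []
  -- for i in range(len(ls)): if len(ls[i].strip()) != 0: i_lastnonempty_line = i
  -- (indices run 0..len-1, so ls.getD i "" is exactly ls[i])
  let i_last : Nat := (List.range ls.length).foldl
    (fun acc i => if PySem.Str.len (PySem.Str.strip (ls.getD i "")) ≠ 0 then i else acc) 0
  -- ls[:i_last+1] with a nonnegative bound is take
  let ls := ls.take (i_last + 1)
  let ls := pts.foldl (fun acc pt => acc ++ [pvBqA pt]) ls
  PySem.Str.join "\n" ls ++ "\n \n "

-- ===== PORT B =====
-- while len(ls) > 1 and ls[-1].strip() == '': ls.pop()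
def pvTrim (ls : List String) : List String :=
  if _h : 1 < ls.length ∧ PySem.Str.strip (ls.getLastD "") = "" then
    pvTrim ls.dropLast
  else ls
termination_by ls.length
decreasing_by simp [List.length_dropLast]; omega

def add_bqlines_alt (stringinput : String) (pts : List (Int × Int × Int)) : String :=
  -- split as in A (sep ≠ "" means split? is always some), then the while/pop trim
  let ls := pvTrim ((PySem.Str.split? stringinput "\n").getD [])
  -- ['bq\t%s\t%s\t%s' % pt for pt in pts] inlined, %s of an int = str(int)
  PySem.Str.join "\n" (ls ++ pts.map (fun pt =>
    "bq" ++ "\t" ++ PySem.Int.toStr pt.1 ++ "\t" ++ PySem.Int.toStr pt.2.1 ++ "\t" ++ PySem.Int.toStr pt.2.2)) ++ "\n \n "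

-- ===== PRECONDITION & SPEC =====
def Spec_add_bqlines (stringinput : String) (pts : List (Int × Int × Int)) (out : String) : Prop := out = add_bqlines_alt stringinput pts
instance (stringinput : String) (pts : List (Int × Int × Int)) (out : String) : Decidable (Spec_add_bqlines stringinput pts out) := by unfold Spec_add_bqlines; infer_instance

-- ===== CLAIM (what is proved, stated in full; the proofs are below) =====
def Claim_equal_add_bqlines : Prop := ∀ (stringinput : String) (pts : List (Int × Int × Int)), Dom_add_bqlines stringinput pts → Spec_add_bqlines stringinput pts (add_bqlines stringinput pts)

-- ===== LEMMAS AND PROOFS =====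

-- A's last-non-empty-index loop, named for the proofs
def pvIdx (ls : List String) : Nat :=
  (List.range ls.length).foldl
    (fun acc i => if PySem.Str.len (PySem.Str.strip (ls.getD i "")) ≠ 0 then i else acc) 0

lemma pvIdx_concat (xs : List String) (x : String) :
    pvIdx (xs ++ [x]) =
      if PySem.Str.len (PySem.Str.strip x) ≠ 0 then xs.length else pvIdx xs := by
  unfold pvIdx
  rw [List.length_append, List.length_singleton, List.range_succ, List.foldl_append]
  have hgetn : (xs ++ [x]).getD xs.length "" = x := by
    simp [List.getD]
  have hcongr : (List.range xs.length).foldl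
      (fun acc i => if PySem.Str.len (PySem.Str.strip ((xs ++ [x]).getD i "")) ≠ 0 then i else acc) 0
      = (List.range xs.length).foldl
      (fun acc i => if PySem.Str.len (PySem.Str.strip (xs.getD i "")) ≠ 0 then i else acc) 0 := by
    apply PySem.List.foldl_congr_mem
    intro acc i hi
    have hi' : i < xs.length := List.mem_range.mp hi
    have : (xs ++ [x]).getD i "" = xs.getD i "" := by
      simp [List.getD, List.getElem?_append_left hi']
    rw [this]
  simp only [List.foldl_cons, List.foldl_nil, hgetn, hcongr]

lemma pvIdx_bound (ls : List String) : pvIdx ls < ls.length ∨ pvIdx ls = 0 := by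
  induction ls using List.reverseRecOn with
  | nil => right; rfl
  | append_singleton xs x ih =>
    rw [pvIdx_concat]
    split_ifs with h
    · left; simp
    · rcases ih with h' | h'
      · left; simp; omega
      · right; exact h'

lemma strip_empty_of_len_zero (s : String) (h : ¬ PySem.Str.len s ≠ 0) : s = "" := by
  simp [PySem.Str.len_eq] at h
  exact String.ext (by simpa using h)

lemma pvTake_eq_trim (ls : List String) : ls.take (pvIdx ls + 1) = pvTrim ls := by
  induction ls using List.reverseRecOn with
  | nil => rw [pvTrim]; simp
  | append_singleton xs x ih =>
    rw [pvIdx_concat, pvTrim]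
    by_cases h : PySem.Str.len (PySem.Str.strip x) ≠ 0
    · -- last line is non-blank: both keep everything
      have hne : ¬ (1 < (xs ++ [x]).length ∧ PySem.Str.strip ((xs ++ [x]).getLastD "") = "") := by
        rintro ⟨-, hstrip⟩
        rw [List.getLastD_concat] at hstrip
        rw [hstrip] at h
        exact h rfl
      rw [if_pos h, dif_neg hne]
      exact List.take_of_length_le (by simp)
    · -- last line is blank
      have hx : PySem.Str.strip x = "" := strip_empty_of_len_zero _ h
      rw [if_neg h]
      rcases List.eq_nil_or_concat' xs with rfl | ⟨ys, y, rfl⟩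
      · -- single line: both keep it
        have hne : ¬ (1 < ([] ++ [x] : List String).length ∧
            PySem.Str.strip (([] ++ [x] : List String).getLastD "") = "") := by
          rintro ⟨hlen, -⟩; simp at hlen
        rw [dif_neg hne]
        simp [pvIdx]
      · have hyes : 1 < (ys ++ [y] ++ [x]).length ∧
            PySem.Str.strip ((ys ++ [y] ++ [x]).getLastD "") = "" := by
          constructor
          · simp
          · rw [List.getLastD_concat]; exact hx
        rw [dif_pos hyes, List.dropLast_concat, ← ih]
        apply List.take_append_of_le_length
        rcases pvIdx_bound (ys ++ [y]) with hb | hb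
        · omega
        · rw [hb]; simp

-- ===== VERDICT (by name: the statement is the Claim_ definition above) =====
theorem add_bqlines_spec : Claim_equal_add_bqlines := by
  intro s pts _
  show add_bqlines s pts = add_bqlines_alt s pts
  show PySem.Str.join "\n" ((List.foldl (fun acc pt => acc ++ [pvBqA pt])
      (((PySem.Str.split? s "\n").getD []).take (pvIdx ((PySem.Str.split? s "\n").getD []) + 1)) pts)) ++ "\n \n "
    = PySem.Str.join "\n" (pvTrim ((PySem.Str.split? s "\n").getD []) ++ pts.map (fun pt =>
      "bq" ++ "\t" ++ PySem.Int.toStr pt.1 ++ "\t" ++ PySem.Int.toStr pt.2.1 ++ "\t" ++ PySem.Int.toStr pt.2.2)) ++ "\n \n "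
  rw [PySem.List.foldl_append_singleton_eq_map]
  rw [pvTake_eq_trim]
  rfl
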